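-- pv_equiv track=rewrite | github.com/hcheng628/algorithm-problems | algorithm-problems/src/main/java/us/supercheng/algorithm/problems/leetcode/sumofalloddlengthsubarrays/Solution.py | sumHelper
-- ===== SOURCE A (Python) =====
-- from typing import List
--
-- def sumHelper(arr:List[int], L:int, size:int) -> int:
--     ret = 0
--     prev = 0
--
--     for i in range(L-size+1):
--         curr = 0
--         if i == 0:
--             for idx in range(size):
--                 curr += arr[idx]
--         else:
--             curr += prev + arr[i+size-1] - arr[i-1]
--
--         ret += curr
--         prev = curr
--
--     return ret
-- ===== SOURCE B (Python) =====
-- def sumHelper(arr, L, size):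
--     P = [0]
--     for x in arr:
--         P.append(P[-1] + x)
--     return sum(P[i + size] - P[i] for i in range(L - size + 1))
-- ===== Notes on version B (the rewrite author's own statement) =====
-- stated objective: alternative
-- what changed: B materialises a prefix-sum table in one pass and then sums window differences P[i+size]-P[i] over start indices, replacing A's incremental sliding-window update with carried prev state.
-- outside the precondition, e.g. on sumHelper([1, 2, 3, 4, 5], 3, -1): A returns 10, B returns 5
import Mathlib
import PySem

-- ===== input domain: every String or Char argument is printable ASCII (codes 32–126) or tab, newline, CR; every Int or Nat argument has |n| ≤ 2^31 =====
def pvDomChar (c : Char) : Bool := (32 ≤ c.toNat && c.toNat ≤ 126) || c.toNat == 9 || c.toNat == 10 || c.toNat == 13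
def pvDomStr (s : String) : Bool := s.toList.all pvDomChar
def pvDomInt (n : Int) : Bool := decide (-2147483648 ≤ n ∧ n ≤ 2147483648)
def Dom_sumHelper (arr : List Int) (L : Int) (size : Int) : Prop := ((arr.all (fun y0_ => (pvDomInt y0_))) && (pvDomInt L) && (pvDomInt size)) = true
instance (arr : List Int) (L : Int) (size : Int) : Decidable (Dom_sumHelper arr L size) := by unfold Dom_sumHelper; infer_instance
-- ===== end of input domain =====

-- B replaces A's incremental sliding-window update by a prefix-sum table plus a separate
-- window-difference pass (alternative decomposition, same O(L) cost).

-- ===== PORT A =====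
def sumHelper (arr : List Int) (L : Int) (size : Int) : Int :=
  ((PySem.List.pyRange 0 (L - size + 1) 1).foldl
      (fun (st : Int × Int) i =>
        let curr : Int :=
          if i == 0 then
            (PySem.List.pyRange 0 size 1).foldl
              (fun c idx => c + PySem.List.pyGetD arr idx 0) 0
          else
            0 + (st.2 + PySem.List.pyGetD arr (i + size - 1) 0
                 - PySem.List.pyGetD arr (i - 1) 0)
        (st.1 + curr, curr))
      (0, 0)).1

-- ===== PORT B =====
-- the prefix-sum table P of Source B: P = [0]; for x in arr: P.append(P[-1] + x)
def pvPrefixB (arr : List Int) : List Int :=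
  arr.foldl (fun q x => q ++ [PySem.List.pyGetD q (-1) 0 + x]) [0]

def sumHelper_alt (arr : List Int) (L : Int) (size : Int) : Int :=
  ((PySem.List.pyRange 0 (L - size + 1) 1).map
      (fun i => PySem.List.pyGetD (pvPrefixB arr) (i + size) 0
                - PySem.List.pyGetD (pvPrefixB arr) i 0)).sum

-- ===== PRECONDITION & SPEC =====
-- Pre_ excludes negative window sizes with a nonempty iteration range (outside the task's natural
-- domain: A there returns accidental negative-index wraparound values), and L > len(arr) with
-- 0 ≤ size ≤ L, where A raises IndexError.
def Pre_sumHelper (arr : List Int) (L : Int) (size : Int) : Prop :=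
  L < size ∨ (0 ≤ size ∧ L ≤ (arr.length : Int))
instance (arr : List Int) (L : Int) (size : Int) : Decidable (Pre_sumHelper arr L size) := by
  unfold Pre_sumHelper; infer_instance
def pvWitness_sumHelper : List Int × Int × Int := ([1, 2, 3, 4], 4, 2)

def Spec_sumHelper (arr : List Int) (L : Int) (size : Int) (out : Int) : Prop :=
  out = sumHelper_alt arr L size
instance (arr : List Int) (L : Int) (size : Int) (out : Int) : Decidable (Spec_sumHelper arr L size out) := by
  unfold Spec_sumHelper; infer_instance

-- ===== CLAIM (what is proved, stated in full; the proofs are below) =====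
def Claim_equal_sumHelper : Prop := ∀ (arr : List Int) (L : Int) (size : Int), Dom_sumHelper arr L size → Pre_sumHelper arr L size → Spec_sumHelper arr L size (sumHelper arr L size)

-- ===== LEMMAS AND PROOFS =====

-- sum of the window of length s starting at i, with getD semantics
def pvWin (arr : List Int) (i s : Nat) : Int :=
  ((List.range s).map (fun j => arr.getD (i + j) 0)).sum

-- the tail of the prefix-sum list built from running total c
def pvTail (c : Int) : List Int → List Int
  | [] => []
  | x :: xs => (c + x) :: pvTail (c + x) xs

theorem pvWin_succ (arr : List Int) (i s : Nat) :
    pvWin arr (i + 1) s = pvWin arr i s + arr.getD (i + s) 0 - arr.getD i 0 := by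
  have h1 : pvWin arr i (s + 1) = pvWin arr i s + arr.getD (i + s) 0 := by
    simp [pvWin, List.range_succ]
  have h2 : pvWin arr i (s + 1) = arr.getD i 0 + pvWin arr (i + 1) s := by
    simp only [pvWin, List.range_succ_eq_map, List.map_cons, List.map_map, List.sum_cons]
    congr 1
    apply congrArg
    apply List.map_congr_left
    intro a _
    simp only [Function.comp_apply]
    have hia : i + Nat.succ a = i + 1 + a := by omega
    rw [hia]
  omega

theorem pvWin_split (arr : List Int) (k s : Nat) :
    pvWin arr 0 (k + s) = pvWin arr 0 k + pvWin arr k s := by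
  induction s with
  | zero => simp [pvWin]
  | succ s ih =>
    have h1 : pvWin arr 0 (k + (s + 1)) = pvWin arr 0 (k + s) + arr.getD (k + s) 0 := by
      have h : k + (s + 1) = (k + s) + 1 := by omega
      rw [h]; simp [pvWin, List.range_succ]
    have h2 : pvWin arr k (s + 1) = pvWin arr k s + arr.getD (k + s) 0 := by
      simp [pvWin, List.range_succ]
    omega

theorem pvWin_cons (x : Int) (xs : List Int) (t : Nat) :
    pvWin (x :: xs) 0 (t + 1) = x + pvWin xs 0 t := by
  simp only [pvWin, List.range_succ_eq_map, List.map_cons, List.map_map, List.sum_cons]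
  congr 1

theorem pv_foldl_add (g : Nat → Int) (l : List Nat) (c : Int) :
    l.foldl (fun acc x => acc + g x) c = c + (l.map g).sum := by
  induction l generalizing c with
  | nil => simp
  | cons x xs ih => simp [List.foldl_cons, ih]; ring

-- A's first window: the inner loop over range(size)
theorem pv_first_window (arr : List Int) (size : Int) (s : Nat) (hs : size = (s : Int)) :
    (PySem.List.pyRange 0 size 1).foldl (fun c idx => c + PySem.List.pyGetD arr idx 0) 0
      = pvWin arr 0 s := by
  subst hs
  rw [PySem.List.pyRange_one, List.foldl_map]
  have h : ((s : Int) - 0).toNat = s := by omega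
  rw [h, pv_foldl_add (fun k => PySem.List.pyGetD arr ((0 : Int) + (k : Nat)) 0)]
  simp [pvWin, PySem.List.pyGetD_natCast]

-- A's loop invariant: after n ≥ 1 iterations ret = Σ windows, prev = last window
theorem pv_A_loop (arr : List Int) (size : Int) (s : Nat) (hs : size = (s : Int))
    (n : Nat) (hn : 1 ≤ n) :
    (PySem.List.pyRange 0 ((n : Nat) : Int) 1).foldl
      (fun (st : Int × Int) i =>
        let curr : Int :=
          if i == 0 then
            (PySem.List.pyRange 0 size 1).foldl
              (fun c idx => c + PySem.List.pyGetD arr idx 0) 0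
          else
            0 + (st.2 + PySem.List.pyGetD arr (i + size - 1) 0
                 - PySem.List.pyGetD arr (i - 1) 0)
        (st.1 + curr, curr))
      (0, 0)
    = (((List.range n).map (fun i => pvWin arr i s)).sum, pvWin arr (n - 1) s) := by
  induction n with
  | zero => omega
  | succ n ih =>
    by_cases h1 : n = 0
    · subst h1
      have hr : PySem.List.pyRange 0 (((1 : Nat) : Nat) : Int) 1 = [0] := by
        have h := PySem.List.pyRange_one_singleton (a := (0 : Int))
        simpa using h
      rw [hr, List.foldl_cons, List.foldl_nil, pv_first_window arr size s hs]
      simp [List.range_one]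
    · have hn' : 1 ≤ n := by omega
      have hsplit : PySem.List.pyRange 0 (((n + 1 : Nat) : Nat) : Int) 1
          = PySem.List.pyRange 0 ((n : Nat) : Int) 1 ++ [((n : Nat) : Int)] := by
        have h : (((n + 1 : Nat) : Nat) : Int) = ((n : Nat) : Int) + 1 := by push_cast; ring
        rw [h, PySem.List.pyRange_one_succ_right (by omega)]
      rw [hsplit, List.foldl_append, ih hn', List.foldl_cons, List.foldl_nil]
      have hne : ((((n : Nat) : Int)) == 0) = false := by
        simp; omega
      simp only [hne, Bool.false_eq_true, if_false]
      have e1 : ((n : Nat) : Int) + size - 1 = ((n - 1 + s : Nat) : Int) := by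
        subst hs; push_cast [Nat.cast_sub hn']; ring
      have e2 : ((n : Nat) : Int) - 1 = ((n - 1 : Nat) : Int) := by
        omega
      rw [e1, e2, PySem.List.pyGetD_natCast, PySem.List.pyGetD_natCast]
      have hw : pvWin arr (n - 1) s + arr.getD (n - 1 + s) 0 - arr.getD (n - 1) 0
          = pvWin arr n s := by
        have h := pvWin_succ arr (n - 1) s
        have hrw : n - 1 + 1 = n := by omega
        rw [hrw] at h; omega
      rw [List.range_succ]
      simp only [List.map_append, List.sum_append, List.map_cons, List.map_nil,
        List.sum_cons, List.sum_nil, Prod.mk.injEq, Nat.add_sub_cancel]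
      constructor <;> omega

-- the foldl of B builds q ++ pvTail c arr when q's last element is c
theorem pv_fold_pref (xs : List Int) (q : List Int) (c : Int)
    (h : PySem.List.pyGetD q (-1) 0 = c) :
    xs.foldl (fun q x => q ++ [PySem.List.pyGetD q (-1) 0 + x]) q = q ++ pvTail c xs := by
  induction xs generalizing q c with
  | nil => simp [pvTail]
  | cons x xs ih =>
    rw [List.foldl_cons, h]
    rw [ih (q ++ [c + x]) (c + x) (PySem.List.pyGetD_neg_one_append_singleton q (c + x) 0)]
    simp [pvTail]

theorem pv_tail_getD (xs : List Int) (c : Int) (m : Nat) (hm : m < xs.length) :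
    (pvTail c xs).getD m 0 = c + pvWin xs 0 (m + 1) := by
  induction xs generalizing c m with
  | nil => simp at hm
  | cons x xs ih =>
    cases m with
    | zero =>
      have h : pvWin (x :: xs) 0 1 = x := by simp [pvWin]
      simp [pvTail, h]
    | succ m =>
      have hm' : m < xs.length := by simpa using hm
      have h := ih (c + x) m hm'
      simp only [pvTail, List.getD_cons_succ]
      rw [h, pvWin_cons]
      ring

theorem pv_P_getD (arr : List Int) (m : Nat) (hm : m ≤ arr.length) :
    PySem.List.pyGetD (pvPrefixB arr) ((m : Nat) : Int) 0 = pvWin arr 0 m := by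
  unfold pvPrefixB
  rw [pv_fold_pref arr [0] 0 (by decide), PySem.List.pyGetD_natCast]
  cases m with
  | zero => simp [pvWin]
  | succ m =>
    have hm' : m < arr.length := by omega
    simp only [List.singleton_append, List.getD_cons_succ]
    rw [pv_tail_getD arr 0 m hm']
    ring

-- B's window-difference pass over start indices
theorem pv_B_loop (arr : List Int) (size : Int) (s : Nat) (hs : size = (s : Int))
    (n : Nat) (hn : 1 ≤ n) (hlen : n - 1 + s ≤ arr.length) :
    ((PySem.List.pyRange 0 ((n : Nat) : Int) 1).map
        (fun i => PySem.List.pyGetD (pvPrefixB arr) (i + size) 0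
                  - PySem.List.pyGetD (pvPrefixB arr) i 0)).sum
      = ((List.range n).map (fun i => pvWin arr i s)).sum := by
  rw [PySem.List.pyRange_one, List.map_map]
  have h0 : (((n : Nat) : Int) - 0).toNat = n := by omega
  rw [h0]
  apply congrArg
  apply List.map_congr_left
  intro k hk
  have hk' : k < n := List.mem_range.mp hk
  have hks : k + s ≤ arr.length := by omega
  have e1 : (0 : Int) + (k : Int) + size = ((k + s : Nat) : Int) := by
    rw [hs]; push_cast; ring
  have e2 : (0 : Int) + (k : Int) = ((k : Nat) : Int) := by ring
  simp only [Function.comp_apply]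
  rw [e1, e2, pv_P_getD arr (k + s) hks, pv_P_getD arr k (by omega)]
  have h := pvWin_split arr k s
  omega

-- ===== VERDICT (by name: the statement is the Claim_ definition above) =====
theorem sumHelper_spec : Claim_equal_sumHelper := by
  intro arr L size _ hpre
  unfold Spec_sumHelper sumHelper sumHelper_alt
  by_cases hn : L - size + 1 ≤ 0
  · rw [show PySem.List.pyRange 0 (L - size + 1) 1 = [] from
      PySem.List.pyRange_one_eq_nil (by omega)]
    simp
  · have hsz : 0 ≤ size := by
      rcases hpre with h | h
      · omega
      · exact h.1
    have hL : L ≤ (arr.length : Int) := by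
      rcases hpre with h | h
      · omega
      · exact h.2
    set s : Nat := size.toNat with hsdef
    have hs : size = (s : Int) := by omega
    set n : Nat := (L - size + 1).toNat with hndef
    have hn1 : 1 ≤ n := by omega
    have hnc : ((n : Nat) : Int) = L - size + 1 := by omega
    have hlen : n - 1 + s ≤ arr.length := by omega
    rw [show L - size + 1 = ((n : Nat) : Int) from hnc.symm]
    rw [pv_A_loop arr size s hs n hn1, pv_B_loop arr size s hs n hn1 hlen]
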